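-- pv_equiv track=rewrite | github.com/mdecelle/advent-of-code | puzzle_8/part_1.py | connect_boxes
-- ===== SOURCE A (Python) =====
-- from collections import Counter
--
-- def connect_boxes(connections, boxes_len):
--   def find_head(v):
--     while v != head_box[v]:
--       v = head_box[v]
--     return v
--   head_box = [i for i in range(boxes_len)]
--   for _,b1,b2 in connections:
--     h1 = find_head(b1)
--     h2 = find_head(b2)
--     head_val = min(h1,h2)
--     head_box[h1] = head_val
--     head_box[h2] = head_val
--
--   circuits = Counter()
--   for box in head_box:
--     b = box
--     while head_box[b] != b:
--       b = head_box[b]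
--     circuits[b] += 1
--   return circuits
-- ===== SOURCE B (Python) =====
-- from collections import Counter
--
-- def connect_boxes(connections, boxes_len):
--   # Flat label propagation: label[i] is always the minimum of i's component.
--   label = list(range(boxes_len))
--   for _, b1, b2 in connections:
--     l1 = label[b1]
--     l2 = label[b2]
--     m = min(l1, l2)
--     label = [m if x == l1 or x == l2 else x for x in label]
--   return Counter(label)
-- ===== Notes on version B (the rewrite author's own statement) =====
-- stated objective: alternative
-- what changed: Replaces A's parent-pointer forest and its two chain-walking while-loops by a fully flattened label array (label[i] is always the component minimum) rewritten in one pass per connection, so the result is just Counter(label) with no tree walking.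
import Mathlib
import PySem

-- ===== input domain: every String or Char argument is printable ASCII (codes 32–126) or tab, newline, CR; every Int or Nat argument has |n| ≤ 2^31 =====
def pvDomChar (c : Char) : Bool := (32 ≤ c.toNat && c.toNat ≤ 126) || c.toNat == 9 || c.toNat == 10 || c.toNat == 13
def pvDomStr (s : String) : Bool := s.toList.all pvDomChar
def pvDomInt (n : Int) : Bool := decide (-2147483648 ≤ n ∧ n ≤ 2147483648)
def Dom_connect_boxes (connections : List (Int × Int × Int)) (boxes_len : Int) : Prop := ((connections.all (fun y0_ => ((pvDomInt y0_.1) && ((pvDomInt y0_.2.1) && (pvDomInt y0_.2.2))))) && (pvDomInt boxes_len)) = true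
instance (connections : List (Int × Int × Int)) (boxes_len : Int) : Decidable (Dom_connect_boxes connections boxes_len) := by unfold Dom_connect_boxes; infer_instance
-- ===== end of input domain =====

-- B replaces A's parent-pointer forest (with chain-walking while-loops) by a fully
-- flattened label array rewritten in one pass per connection; objective: alternative
-- (a different algorithm, not claimed faster).

-- ===== PORT A =====
-- A's `find_head` while-loop (the identical inline while-loop of A's second phase is
-- the same loop), as a fuelled loop; fuel hb.length + 1 is always sufficient on Pre_.
def pvFindA (hb : List Int) (v : Int) : Nat → Int
  | 0 => v
  | fuel + 1 =>
    match PySem.List.pyGet? hb v with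
    | none => v            -- Python raises IndexError here; excluded by Pre_
    | some x => if v = x then v else pvFindA hb x fuel

def connect_boxes (connections : List (Int × Int × Int)) (boxes_len : Int) : List (Int × Int) :=
  let hb0 := PySem.List.pyRange 0 boxes_len 1
  let hb := connections.foldl (fun hb c =>
      let h1 := pvFindA hb c.2.1 (hb.length + 1)
      let h2 := pvFindA hb c.2.2 (hb.length + 1)
      let m := min h1 h2
      PySem.List.pySetD (PySem.List.pySetD hb h1 m) h2 m) hb0
  (hb.foldl (fun d box => d.modify (pvFindA hb box (hb.length + 1)) 0 (· + 1))
    PySem.Dict.empty).items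

-- ===== PORT B =====
def connect_boxes_alt (connections : List (Int × Int × Int)) (boxes_len : Int) : List (Int × Int) :=
  let lab := connections.foldl (fun lab c =>
      let l1 := PySem.List.pyGetD lab c.2.1 0   -- Python raises IndexError when out of range; excluded by Pre_
      let l2 := PySem.List.pyGetD lab c.2.2 0
      let m := min l1 l2
      lab.map (fun x => if x = l1 || x = l2 then m else x))
    (PySem.List.pyRange 0 boxes_len 1)
  (PySem.Dict.counter lab).items

-- ===== PRECONDITION & SPEC =====
-- Pre_ excludes exactly the inputs on which A raises IndexError: a connection whose
-- box index is out of range for the head_box list (Python's negative in-range indices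
-- are admitted; both programs return there and agree).
def Pre_connect_boxes (connections : List (Int × Int × Int)) (boxes_len : Int) : Prop :=
  ∀ c ∈ connections, PySem.Raise.InRange boxes_len.toNat c.2.1 ∧ PySem.Raise.InRange boxes_len.toNat c.2.2
instance (connections : List (Int × Int × Int)) (boxes_len : Int) : Decidable (Pre_connect_boxes connections boxes_len) := by unfold Pre_connect_boxes; infer_instance
def pvWitness_connect_boxes : (List (Int × Int × Int)) × Int := ([(5, 0, 1), (7, 2, 1)], 4)
def Spec_connect_boxes (connections : List (Int × Int × Int)) (boxes_len : Int) (out : List (Int × Int)) : Prop := out = connect_boxes_alt connections boxes_len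
instance (connections : List (Int × Int × Int)) (boxes_len : Int) (out : List (Int × Int)) : Decidable (Spec_connect_boxes connections boxes_len out) := by unfold Spec_connect_boxes; infer_instance

-- ===== CLAIM (what is proved, stated in full; the proofs are below) =====
def Claim_equal_connect_boxes : Prop := ∀ (connections : List (Int × Int × Int)) (boxes_len : Int), Dom_connect_boxes connections boxes_len → Pre_connect_boxes connections boxes_len → Spec_connect_boxes connections boxes_len (connect_boxes connections boxes_len)

-- ===== LEMMAS AND PROOFS =====

-- `hb` is a union-find forest whose parent pointers never increase: every entry is a
-- nonnegative index bounded by its position.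
def pvGood (hb : List Int) : Prop :=
  ∀ i : Nat, i < hb.length → 0 ≤ hb.getD i 0 ∧ hb.getD i 0 ≤ (i : Int)

-- canonical root of index i in the forest hb (fuel i+1 suffices under pvGood)
def pvRootN (hb : List Int) (i : Nat) : Int := pvFindA hb i (i + 1)

-- Python's normalisation of a (possibly negative) in-range list index
def pvNorm (n : Nat) (v : Int) : Nat := if v < 0 then (v + n).toNat else v.toNat

lemma pvGetD_lt {hb : List Int} {i : Nat} (h : i < hb.length) :
    PySem.List.pyGet? hb (i : Int) = some (hb.getD i 0) := by
  simp [PySem.List.pyGet?_natCast, List.getElem?_eq_getElem h, List.getD]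

lemma pvRootN_spec (hb : List Int) (hg : pvGood hb) :
    ∀ i : Nat, i < hb.length →
      (0 ≤ pvRootN hb i ∧ pvRootN hb i ≤ (i : Int) ∧
       (pvRootN hb i).toNat < hb.length ∧
       hb.getD (pvRootN hb i).toNat 0 = pvRootN hb i) ∧
      (∀ f : Nat, i + 1 ≤ f → pvFindA hb (i : Int) f = pvRootN hb i) := by
  intro i
  induction i using Nat.strong_induction_on with
  | _ i ih =>
    intro hi
    obtain ⟨hx0, hxle⟩ := hg i hi
    have hget := pvGetD_lt hi
    by_cases hxi : hb.getD i 0 = (i : Int)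
    · have hroot : ∀ f : Nat, i + 1 ≤ f → pvFindA hb (i : Int) f = (i : Int) := by
        intro f hf
        obtain ⟨f', rfl⟩ : ∃ f', f = f' + 1 := ⟨f - 1, by omega⟩
        simp only [pvFindA, hget]
        rw [if_pos hxi.symm]
      have hR : pvRootN hb i = (i : Int) := hroot (i + 1) le_rfl
      refine ⟨⟨by omega, by omega, ?_, ?_⟩, fun f hf => by rw [hroot f hf, hR]⟩
      · rw [hR]; simpa using hi
      · rw [hR]; simpa using hxi
    · have hxlt : hb.getD i 0 < (i : Int) := lt_of_le_of_ne hxle hxi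
      set k := (hb.getD i 0).toNat with hk
      have hki : k < i := by omega
      have hcast : hb.getD i 0 = (k : Int) := by omega
      obtain ⟨⟨h0, hle, hlen, hfix⟩, hfuel⟩ := ih k hki (by omega)
      have hstep : ∀ f : Nat, i + 1 ≤ f → pvFindA hb (i : Int) f = pvRootN hb k := by
        intro f hf
        obtain ⟨f', rfl⟩ : ∃ f', f = f' + 1 := ⟨f - 1, by omega⟩
        have hne : ¬ ((i : Int) = hb.getD i 0) := by omega
        simp only [pvFindA, hget, hne, if_false]
        rw [hcast]
        exact hfuel f' (by omega)
      have hR : pvRootN hb i = pvRootN hb k := hstep (i + 1) le_rfl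
      rw [hR]
      exact ⟨⟨h0, by omega, hlen, hfix⟩, hstep⟩

lemma pvRootN_fix {hb : List Int} {i : Nat} (hi : i < hb.length)
    (h : hb.getD i 0 = (i : Int)) : pvRootN hb i = (i : Int) := by
  show pvFindA hb (i : Int) (i + 1) = (i : Int)
  simp only [pvFindA, pvGetD_lt hi]
  rw [if_pos h.symm]

lemma pvRootN_link (hb : List Int) (hg : pvGood hb) {i : Nat} (hi : i < hb.length) :
    pvRootN hb i = pvRootN hb (hb.getD i 0).toNat := by
  obtain ⟨hx0, hxle⟩ := hg i hi
  by_cases hxi : hb.getD i 0 = (i : Int)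
  · have ht : (hb.getD i 0).toNat = i := by omega
    rw [ht, pvRootN_fix hi hxi]
  · have hxlt : hb.getD i 0 < (i : Int) := lt_of_le_of_ne hxle hxi
    have hki : (hb.getD i 0).toNat < i := by omega
    have hcast : hb.getD i 0 = ((hb.getD i 0).toNat : Int) := by omega
    have hne : ¬ ((i : Int) = hb.getD i 0) := by omega
    have hfuel := (pvRootN_spec hb hg (hb.getD i 0).toNat (by omega)).2
    show pvFindA hb (i : Int) (i + 1) = _
    simp only [pvFindA, pvGetD_lt hi, hne, if_false]
    rw [hcast]
    exact hfuel i (by omega)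

lemma pvFindA_inRange (hb : List Int) (hg : pvGood hb) {v : Int}
    (hv : PySem.Raise.InRange hb.length v) :
    pvFindA hb v (hb.length + 1) = pvRootN hb (pvNorm hb.length v) := by
  obtain ⟨hlo, hhi⟩ := hv
  by_cases h0 : 0 ≤ v
  · have hk : v.toNat < hb.length := by omega
    have hc : v = (v.toNat : Int) := by omega
    rw [pvNorm, if_neg (by omega), hc]
    exact (pvRootN_spec hb hg v.toNat hk).2 (hb.length + 1) (by omega)
  · have hk : (v + hb.length).toNat < hb.length := by omega
    have hidx : PySem.List.pyIdx? hb.length v = some (v + hb.length).toNat := by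
      rw [PySem.List.pyIdx?, if_neg (by omega), if_pos (by omega)]
      congr 1
      omega
    have hget : PySem.List.pyGet? hb v = some (hb.getD (v + hb.length).toNat 0) := by
      rw [PySem.List.pyGet?, hidx]
      simp [List.getD, List.getElem?_eq_getElem hk]
    obtain ⟨hx0, hxle⟩ := hg (v + hb.length).toNat hk
    rw [pvNorm, if_pos (by omega)]
    simp only [pvFindA, hget]
    rw [if_neg (by omega)]
    have hc : hb.getD (v + hb.length).toNat 0 = ((hb.getD (v + hb.length).toNat 0).toNat : Int) := by omega
    rw [hc, (pvRootN_spec hb hg _ (by omega)).2 hb.length (by omega)]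
    exact (pvRootN_link hb hg hk).symm

lemma pvGetD_inRange (lab : List Int) {v : Int}
    (hv : PySem.Raise.InRange lab.length v) :
    PySem.List.pyGetD lab v 0 = lab.getD (pvNorm lab.length v) 0 := by
  obtain ⟨hlo, hhi⟩ := hv
  by_cases h0 : 0 ≤ v
  · rw [PySem.List.pyGetD_of_nonneg lab 0 h0, pvNorm, if_neg (by omega)]
  · have hk : (v + lab.length).toNat < lab.length := by omega
    have hidx : PySem.List.pyIdx? lab.length v = some (v + lab.length).toNat := by
      rw [PySem.List.pyIdx?, if_neg (by omega), if_pos (by omega)]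
      congr 1
      omega
    rw [pvNorm, if_pos (by omega), PySem.List.pyGetD, PySem.List.pyGet?, hidx]
    simp [List.getD, List.getElem?_eq_getElem hk]

lemma pvGetD_set {hb : List Int} (k : Nat) (hk : k < hb.length) (m : Int) (i : Nat) :
    (hb.set k m).getD i 0 = if i = k then m else hb.getD i 0 := by
  by_cases hik : i = k
  · subst hik
    simp [List.getD, hk]
  · simp [List.getD, List.getElem?_set_ne (fun h => hik h.symm)]
    simp [hik]

lemma pvStep_good {hb : List Int} (hg : pvGood hb) {h1 h2 : Nat}
    (hh1 : h1 < hb.length) (hh2 : h2 < hb.length) :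
    pvGood ((hb.set h1 (min (h1 : Int) (h2 : Int))).set h2 (min (h1 : Int) (h2 : Int))) := by
  intro i hi
  simp only [List.length_set] at hi
  have hm0 : 0 ≤ min (h1 : Int) (h2 : Int) := le_min (by positivity) (by positivity)
  rw [pvGetD_set h2 (by simpa using hh2), pvGetD_set h1 hh1]
  obtain ⟨hg0, hgle⟩ := hg i hi
  split_ifs with e2 e1
  · subst e2
    exact ⟨hm0, min_le_right _ _⟩
  · subst e1
    exact ⟨hm0, min_le_left _ _⟩
  · exact ⟨hg0, hgle⟩

lemma pvStep_root {hb : List Int} (hg : pvGood hb) {h1 h2 : Nat}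
    (hh1 : h1 < hb.length) (hh2 : h2 < hb.length)
    (hf1 : hb.getD h1 0 = (h1 : Int)) (hf2 : hb.getD h2 0 = (h2 : Int)) :
    ∀ i : Nat, i < hb.length →
      pvRootN ((hb.set h1 (min (h1 : Int) (h2 : Int))).set h2 (min (h1 : Int) (h2 : Int))) i =
        if pvRootN hb i = (h1 : Int) ∨ pvRootN hb i = (h2 : Int)
        then min (h1 : Int) (h2 : Int) else pvRootN hb i := by
  have hg' := pvStep_good hg hh1 hh2
  have hlen' : ((hb.set h1 (min (h1 : Int) (h2 : Int))).set h2 (min (h1 : Int) (h2 : Int))).length = hb.length := by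
    simp
  have hget' : ∀ j : Nat,
      ((hb.set h1 (min (h1 : Int) (h2 : Int))).set h2 (min (h1 : Int) (h2 : Int))).getD j 0 =
        if j = h2 then min (h1 : Int) (h2 : Int)
        else if j = h1 then min (h1 : Int) (h2 : Int) else hb.getD j 0 := fun j => by
    rw [pvGetD_set h2 (by simpa using hh2), pvGetD_set h1 hh1]
  have hm0 : 0 ≤ min (h1 : Int) (h2 : Int) := le_min (by positivity) (by positivity)
  intro i
  induction i using Nat.strong_induction_on with
  | _ i ih =>
    intro hi
    by_cases hcase : i = h2 ∨ i = h1
    · have hfixi : hb.getD i 0 = (i : Int) := by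
        rcases hcase with h | h <;> rw [h]
        · exact hf2
        · exact hf1
      have hRi : pvRootN hb i = (i : Int) := pvRootN_fix hi hfixi
      have hcond : pvRootN hb i = (h1 : Int) ∨ pvRootN hb i = (h2 : Int) := by
        rcases hcase with h | h
        · exact Or.inr (by rw [hRi, h])
        · exact Or.inl (by rw [hRi, h])
      rw [if_pos hcond]
      have hgi' : ((hb.set h1 (min (h1 : Int) (h2 : Int))).set h2 (min (h1 : Int) (h2 : Int))).getD i 0 =
          min (h1 : Int) (h2 : Int) := by
        rw [hget' i]
        by_cases h2c : i = h2
        · rw [if_pos h2c]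
        · rcases hcase with h | h
          · exact absurd h h2c
          · rw [if_neg h2c, if_pos h]
      by_cases hmi : min (h1 : Int) (h2 : Int) = (i : Int)
      · rw [pvRootN_fix (by omega) (hgi'.trans hmi), hmi]
      · have hmle : min (h1 : Int) (h2 : Int) ≤ (i : Int) := by
          rcases hcase with h | h <;> rw [h]
          · exact min_le_right _ _
          · exact min_le_left _ _
        have hmh : (min (h1 : Int) (h2 : Int)).toNat = h1 ∨ (min (h1 : Int) (h2 : Int)).toNat = h2 := by
          rcases min_choice (h1 : Int) (h2 : Int) with h | h
          · left; omega
          · right; omega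
        have hfixm : ((hb.set h1 (min (h1 : Int) (h2 : Int))).set h2 (min (h1 : Int) (h2 : Int))).getD
            (min (h1 : Int) (h2 : Int)).toNat 0 = (((min (h1 : Int) (h2 : Int)).toNat : Nat) : Int) := by
          rw [hget']
          rcases hmh with h | h
          · rw [h]
            by_cases h12 : h1 = h2
            · rw [if_pos h12]; omega
            · rw [if_neg h12, if_pos rfl]; omega
          · rw [h, if_pos rfl]; omega
        have hlink := pvRootN_link _ hg' (show i < ((hb.set h1 (min (h1 : Int) (h2 : Int))).set h2 (min (h1 : Int) (h2 : Int))).length by omega)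
        rw [hlink, hgi']
        rw [pvRootN_fix (by rcases hmh with h | h <;> omega) hfixm]
        omega
    · rw [not_or] at hcase
      obtain ⟨hne2, hne1⟩ := hcase
      have hgi' : ((hb.set h1 (min (h1 : Int) (h2 : Int))).set h2 (min (h1 : Int) (h2 : Int))).getD i 0 =
          hb.getD i 0 := by
        rw [hget' i, if_neg hne2, if_neg hne1]
      obtain ⟨hx0, hxle⟩ := hg i hi
      by_cases hxi : hb.getD i 0 = (i : Int)
      · have hRi : pvRootN hb i = (i : Int) := pvRootN_fix hi hxi
        have hcond : ¬ (pvRootN hb i = (h1 : Int) ∨ pvRootN hb i = (h2 : Int)) := by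
          rw [hRi, not_or]
          constructor <;> intro h
          · exact hne1 (by omega)
          · exact hne2 (by omega)
        rw [if_neg hcond, hRi]
        rw [pvRootN_fix (by omega) (hgi'.trans hxi)]
      · have hxlt : hb.getD i 0 < (i : Int) := lt_of_le_of_ne hxle hxi
        have hki : (hb.getD i 0).toNat < i := by omega
        have hlinkA : pvRootN hb i = pvRootN hb (hb.getD i 0).toNat := pvRootN_link hb hg hi
        have hlinkB := pvRootN_link _ hg' (show i < ((hb.set h1 (min (h1 : Int) (h2 : Int))).set h2 (min (h1 : Int) (h2 : Int))).length by omega)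
        rw [hgi'] at hlinkB
        rw [hlinkA, hlinkB, ih (hb.getD i 0).toNat hki (by omega)]

lemma pvNorm_lt {n : Nat} {v : Int} (hv : PySem.Raise.InRange n v) : pvNorm n v < n := by
  obtain ⟨hlo, hhi⟩ := hv
  unfold pvNorm
  split_ifs <;> omega

lemma pvGetD_map (f : Int → Int) (lab : List Int) {i : Nat} (hi : i < lab.length) :
    (lab.map f).getD i 0 = f (lab.getD i 0) := by
  simp [List.getD, List.getElem?_eq_getElem hi]

-- the loop invariant tying A's forest to B's flat labels
def pvInv (hb lab : List Int) : Prop :=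
  lab.length = hb.length ∧ pvGood hb ∧
  ∀ i : Nat, i < hb.length → lab.getD i 0 = pvRootN hb i

lemma pvStep_inv {hb lab : List Int} (hinv : pvInv hb lab) {c : Int × Int × Int}
    (hc1 : PySem.Raise.InRange hb.length c.2.1)
    (hc2 : PySem.Raise.InRange hb.length c.2.2) :
    pvInv
      (PySem.List.pySetD
        (PySem.List.pySetD hb (pvFindA hb c.2.1 (hb.length + 1))
          (min (pvFindA hb c.2.1 (hb.length + 1)) (pvFindA hb c.2.2 (hb.length + 1))))
        (pvFindA hb c.2.2 (hb.length + 1))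
        (min (pvFindA hb c.2.1 (hb.length + 1)) (pvFindA hb c.2.2 (hb.length + 1))))
      (lab.map (fun x =>
        if x = PySem.List.pyGetD lab c.2.1 0 || x = PySem.List.pyGetD lab c.2.2 0
        then min (PySem.List.pyGetD lab c.2.1 0) (PySem.List.pyGetD lab c.2.2 0) else x)) ∧
    (PySem.List.pySetD
        (PySem.List.pySetD hb (pvFindA hb c.2.1 (hb.length + 1))
          (min (pvFindA hb c.2.1 (hb.length + 1)) (pvFindA hb c.2.2 (hb.length + 1))))
        (pvFindA hb c.2.2 (hb.length + 1))
        (min (pvFindA hb c.2.1 (hb.length + 1)) (pvFindA hb c.2.2 (hb.length + 1)))).length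
      = hb.length := by
  obtain ⟨hlab, hg, hlabs⟩ := hinv
  have hn1 : pvNorm hb.length c.2.1 < hb.length := pvNorm_lt hc1
  have hn2 : pvNorm hb.length c.2.2 < hb.length := pvNorm_lt hc2
  obtain ⟨hr10, hr1le, hr1lt, hr1fix⟩ := (pvRootN_spec hb hg _ hn1).1
  obtain ⟨hr20, hr2le, hr2lt, hr2fix⟩ := (pvRootN_spec hb hg _ hn2).1
  have hr1 : pvFindA hb c.2.1 (hb.length + 1) = pvRootN hb (pvNorm hb.length c.2.1) :=
    pvFindA_inRange hb hg hc1
  have hr2 : pvFindA hb c.2.2 (hb.length + 1) = pvRootN hb (pvNorm hb.length c.2.2) :=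
    pvFindA_inRange hb hg hc2
  have hcast1 : ((pvRootN hb (pvNorm hb.length c.2.1)).toNat : Int) = pvRootN hb (pvNorm hb.length c.2.1) := by omega
  have hcast2 : ((pvRootN hb (pvNorm hb.length c.2.2)).toNat : Int) = pvRootN hb (pvNorm hb.length c.2.2) := by omega
  have hl1 : PySem.List.pyGetD lab c.2.1 0 = pvRootN hb (pvNorm hb.length c.2.1) := by
    rw [pvGetD_inRange lab (hlab ▸ hc1), hlab]
    exact hlabs _ hn1
  have hl2 : PySem.List.pyGetD lab c.2.2 0 = pvRootN hb (pvNorm hb.length c.2.2) := by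
    rw [pvGetD_inRange lab (hlab ▸ hc2), hlab]
    exact hlabs _ hn2
  rw [hr1, hr2, hl1, hl2,
    PySem.List.pySetD_of_nonneg _ _ hr10, PySem.List.pySetD_of_nonneg _ _ hr20]
  have hf1 : hb.getD (pvRootN hb (pvNorm hb.length c.2.1)).toNat 0 =
      ((pvRootN hb (pvNorm hb.length c.2.1)).toNat : Int) := by rw [hcast1]; exact hr1fix
  have hf2 : hb.getD (pvRootN hb (pvNorm hb.length c.2.2)).toNat 0 =
      ((pvRootN hb (pvNorm hb.length c.2.2)).toNat : Int) := by rw [hcast2]; exact hr2fix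
  have hgood' := pvStep_good hg hr1lt hr2lt
  rw [hcast1, hcast2] at hgood'
  refine ⟨⟨by simp [hlab], hgood', ?_⟩, by simp⟩
  intro i hi
  simp only [List.length_set] at hi
  have hroot := pvStep_root hg hr1lt hr2lt hf1 hf2 i hi
  rw [hcast1, hcast2] at hroot
  rw [pvGetD_map _ _ (by omega : i < lab.length), hlabs i hi, hroot]
  simp only [Bool.or_eq_true, decide_eq_true_eq]

lemma pvFold_inv (conns : List (Int × Int × Int)) :
    ∀ hb lab : List Int, pvInv hb lab →
      (∀ c ∈ conns, PySem.Raise.InRange hb.length c.2.1 ∧ PySem.Raise.InRange hb.length c.2.2) →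
      pvInv
        (conns.foldl (fun hb c =>
          PySem.List.pySetD
            (PySem.List.pySetD hb (pvFindA hb c.2.1 (hb.length + 1))
              (min (pvFindA hb c.2.1 (hb.length + 1)) (pvFindA hb c.2.2 (hb.length + 1))))
            (pvFindA hb c.2.2 (hb.length + 1))
            (min (pvFindA hb c.2.1 (hb.length + 1)) (pvFindA hb c.2.2 (hb.length + 1)))) hb)
        (conns.foldl (fun lab c =>
          lab.map (fun x =>
            if x = PySem.List.pyGetD lab c.2.1 0 || x = PySem.List.pyGetD lab c.2.2 0
            then min (PySem.List.pyGetD lab c.2.1 0) (PySem.List.pyGetD lab c.2.2 0) else x)) lab) ∧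
      (conns.foldl (fun hb c =>
          PySem.List.pySetD
            (PySem.List.pySetD hb (pvFindA hb c.2.1 (hb.length + 1))
              (min (pvFindA hb c.2.1 (hb.length + 1)) (pvFindA hb c.2.2 (hb.length + 1))))
            (pvFindA hb c.2.2 (hb.length + 1))
            (min (pvFindA hb c.2.1 (hb.length + 1)) (pvFindA hb c.2.2 (hb.length + 1)))) hb).length
        = hb.length := by
  induction conns with
  | nil => exact fun hb lab hinv _ => ⟨hinv, rfl⟩
  | cons c cs ih =>
    intro hb lab hinv hc
    obtain ⟨hinv', hlen'⟩ := pvStep_inv hinv (hc c (by simp)).1 (hc c (by simp)).2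
    simp only [List.foldl_cons]
    obtain ⟨hinv'', hlen''⟩ := ih _ _ hinv'
      (fun d hd => by rw [hlen']; exact hc d (List.mem_cons_of_mem c hd))
    exact ⟨hinv'', by rw [hlen'', hlen']⟩

lemma pvKeys_eq {hb lab : List Int} (hinv : pvInv hb lab) :
    hb.map (fun box => pvFindA hb box (hb.length + 1)) = lab := by
  obtain ⟨hlab, hg, hlabs⟩ := hinv
  apply List.ext_getElem (by simp [hlab])
  intro i hi1 hi2
  have hi : i < hb.length := by simpa using hi1
  obtain ⟨hx0, hxle⟩ := hg i hi
  have hbi : hb[i]'(by omega) = hb.getD i 0 := by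
    simp [List.getD, List.getElem?_eq_getElem hi]
  simp only [List.getElem_map]
  rw [hbi, pvFindA_inRange hb hg (⟨by omega, by omega⟩ : PySem.Raise.InRange hb.length (hb.getD i 0))]
  have hnorm : pvNorm hb.length (hb.getD i 0) = (hb.getD i 0).toNat := by
    unfold pvNorm
    rw [if_neg (by omega)]
  rw [hnorm, ← pvRootN_link hb hg hi, ← hlabs i hi]
  simp [List.getD, List.getElem?_eq_getElem hi2]

lemma pvFoldA_counter (F : List Int) :
    F.foldl (fun d box => PySem.Dict.modify d (pvFindA F box (F.length + 1)) 0 (· + 1)) PySem.Dict.empty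
      = PySem.Dict.counter (F.map (fun box => pvFindA F box (F.length + 1))) := by
  rw [PySem.Dict.counter_eq_foldl, List.foldl_map]

-- ===== VERDICT (by name: the statement is the Claim_ definition above) =====
theorem connect_boxes_spec : Claim_equal_connect_boxes := by
  intro conns n _hdom hpre
  unfold Spec_connect_boxes
  simp only [connect_boxes, connect_boxes_alt]
  have hlen0 : (PySem.List.pyRange 0 n 1).length = n.toNat := by
    rw [PySem.List.length_pyRange_one]
    norm_num
  have hgood0 : ∀ i : Nat, i < (PySem.List.pyRange 0 n 1).length →
      (PySem.List.pyRange 0 n 1).getD i 0 = (i : Int) := by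
    intro i hi
    simp [List.getD, List.getElem?_eq_getElem hi, PySem.List.getElem_pyRange_one]
  have hinv0 : pvInv (PySem.List.pyRange 0 n 1) (PySem.List.pyRange 0 n 1) :=
    ⟨rfl, fun i hi => by rw [hgood0 i hi]; exact ⟨by omega, le_refl _⟩,
     fun i hi => (hgood0 i hi).trans (pvRootN_fix hi (hgood0 i hi)).symm⟩
  obtain ⟨hinvF, _⟩ := pvFold_inv conns _ _ hinv0
    (fun c hc => by rw [hlen0]; exact hpre c hc)
  congr 1
  rw [pvFoldA_counter, pvKeys_eq hinvF]
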